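-- pv_equiv track=rewrite | github.com/IvAnastasia/Multilingual-Refusal | evaluators/wildguard.py | count_safety
-- ===== SOURCE A (Python) =====
-- def count_safety(items):
--     counts = {'safe': 0, 'unsafe': 0}
--     safety_list = []
--     for item in items:
--         if item.strip() == 'safe':
--             counts['safe'] += 1
--             safety_list.append(1)
--         else:
--             counts['unsafe'] += 1
--             safety_list.append(0)
--     return counts, safety_list
-- ===== SOURCE B (Python) =====
-- def count_safety(items):
--     # Divide and conquer: split the list in halves, recursively compute
--     # (safe count, binary list) for each half, and combine; unsafe = len - safe.
--     def go(seg):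
--         n = len(seg)
--         if n == 0:
--             return 0, []
--         if n == 1:
--             b = 1 if seg[0].strip() == 'safe' else 0
--             return b, [b]
--         mid = n // 2
--         s1, l1 = go(seg[:mid])
--         s2, l2 = go(seg[mid:])
--         return s1 + s2, l1 + l2
--     safe, lst = go(items)
--     return {'safe': safe, 'unsafe': len(items) - safe}, lst
-- ===== Notes on version B (the rewrite author's own statement) =====
-- stated objective: alternative
-- what changed: A maintains counts and the binary list incrementally in one left-to-right loop; B computes (safe count, binary list) by divide and conquer on halves of the list and derives the unsafe count as len - safe.
import Mathlib
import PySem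

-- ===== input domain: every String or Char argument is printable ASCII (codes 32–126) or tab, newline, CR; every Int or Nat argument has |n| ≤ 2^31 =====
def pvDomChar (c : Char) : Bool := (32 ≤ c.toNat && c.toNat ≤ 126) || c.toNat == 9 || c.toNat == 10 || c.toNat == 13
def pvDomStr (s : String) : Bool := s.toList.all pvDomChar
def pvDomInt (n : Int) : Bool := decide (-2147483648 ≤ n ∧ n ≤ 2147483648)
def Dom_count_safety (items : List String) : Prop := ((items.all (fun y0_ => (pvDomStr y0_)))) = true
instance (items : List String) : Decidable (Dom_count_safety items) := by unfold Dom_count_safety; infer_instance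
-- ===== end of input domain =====

-- B replaces A's single incremental counting loop by a divide-and-conquer recursion on
-- halves of the list, deriving the unsafe count as len - safe; alternative decomposition.

-- ===== PORT A =====
def count_safety (items : List String) : (List (String × Int)) × List Int :=
  let st := items.foldl
    (fun (st : PySem.Dict String Int × List Int) item =>
      if PySem.Str.strip item == "safe" then
        (st.1.modify "safe" 0 (· + 1), st.2 ++ [1])
      else
        (st.1.modify "unsafe" 0 (· + 1), st.2 ++ [0]))
    (PySem.Dict.ofList [("safe", 0), ("unsafe", 0)], [])
  (st.1.items, st.2)

-- ===== PORT B =====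
-- Source B's inner recursive helper `go` (divide and conquer on halves)
def csGo (seg : List String) : Int × List Int :=
  match seg with
  | [] => (0, [])
  | [x] =>
    let b : Int := if PySem.Str.strip x == "safe" then 1 else 0
    (b, [b])
  | a :: b :: rest =>
    let mid := (a :: b :: rest).length / 2
    let p1 := csGo ((a :: b :: rest).take mid)
    let p2 := csGo ((a :: b :: rest).drop mid)
    (p1.1 + p2.1, p1.2 ++ p2.2)
termination_by seg.length
decreasing_by
  · simp [List.length_take]; omega
  · simp; omega

def count_safety_alt (items : List String) : (List (String × Int)) × List Int :=
  let r := csGo items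
  ([("safe", r.1), ("unsafe", (items.length : Int) - r.1)], r.2)

-- ===== PRECONDITION & SPEC =====
def Spec_count_safety (items : List String) (out : (List (String × Int)) × List Int) : Prop := out = count_safety_alt items
instance (items : List String) (out : (List (String × Int)) × List Int) : Decidable (Spec_count_safety items out) := by unfold Spec_count_safety; infer_instance

-- ===== CLAIM (what is proved, stated in full; the proofs are below) =====
def Claim_equal_count_safety : Prop := ∀ (items : List String), Dom_count_safety items → Spec_count_safety items (count_safety items)

-- ===== LEMMAS AND PROOFS =====

-- B's divide-and-conquer helper computes the 0/1 map and its sum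
theorem csGo_eq (seg : List String) :
    csGo seg =
      ((seg.map (fun item => if PySem.Str.strip item == "safe" then (1 : Int) else 0)).sum,
       seg.map (fun item => if PySem.Str.strip item == "safe" then (1 : Int) else 0)) := by
  induction seg using csGo.induct with
  | case1 => simp [csGo]
  | case2 x => simp [csGo]
  | case3 a b rest mid ih1 ih2 =>
    rw [csGo, ih1, ih2]
    have h := List.take_append_drop mid (a :: b :: rest)
    conv_rhs => rw [← h]
    simp

-- loop invariant: A's fold over a two-key literal dict, from arbitrary counts s, u and accumulator acc
theorem count_safety_loop (items : List String) (s u : Int) (acc : List Int) :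
    items.foldl
      (fun (st : PySem.Dict String Int × List Int) item =>
        if PySem.Str.strip item == "safe" then
          (st.1.modify "safe" 0 (· + 1), st.2 ++ [1])
        else
          (st.1.modify "unsafe" 0 (· + 1), st.2 ++ [0]))
      (PySem.Dict.mk [("safe", s), ("unsafe", u)], acc) =
    (PySem.Dict.mk
        [("safe", s + (items.map (fun item => if PySem.Str.strip item == "safe" then (1 : Int) else 0)).sum),
         ("unsafe", u + ((items.length : Int) - (items.map (fun item => if PySem.Str.strip item == "safe" then (1 : Int) else 0)).sum))],
      acc ++ items.map (fun item => if PySem.Str.strip item == "safe" then (1 : Int) else 0)) := by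
  induction items generalizing s u acc with
  | nil => simp
  | cons x xs ih =>
    by_cases hx : PySem.Str.strip x == "safe"
    · simp only [List.foldl_cons, hx, if_true, List.map_cons, List.sum_cons]
      have hm : (PySem.Dict.mk [("safe", s), ("unsafe", u)]).modify "safe" 0 (· + 1) =
          PySem.Dict.mk [("safe", s + 1), ("unsafe", u)] := by
        apply PySem.Dict.ext
        simp [PySem.Dict.insert, PySem.Dict.modify, PySem.Dict.getD, PySem.Dict.get?, PySem.Dict.contains]
      rw [hm, ih]
      refine congrArg₂ Prod.mk ?_ (by simp)
      apply PySem.Dict.ext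
      simp only [List.length_cons, List.cons.injEq, Prod.mk.injEq, true_and, and_true]
      constructor <;> (push_cast; ring)
    · simp only [List.foldl_cons, hx, if_false, List.map_cons, List.sum_cons, Bool.false_eq_true]
      have hm : (PySem.Dict.mk [("safe", s), ("unsafe", u)]).modify "unsafe" 0 (· + 1) =
          PySem.Dict.mk [("safe", s), ("unsafe", u + 1)] := by
        apply PySem.Dict.ext
        simp [PySem.Dict.insert, PySem.Dict.modify, PySem.Dict.getD, PySem.Dict.get?, PySem.Dict.contains]
      rw [hm, ih]
      refine congrArg₂ Prod.mk ?_ (by simp)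
      apply PySem.Dict.ext
      simp only [List.length_cons, List.cons.injEq, Prod.mk.injEq, true_and, and_true]
      constructor <;> (push_cast; ring)

-- ===== VERDICT (by name: the statement is the Claim_ definition above) =====
theorem count_safety_spec : Claim_equal_count_safety := by
  intro items _
  unfold Spec_count_safety count_safety count_safety_alt
  have h0 : PySem.Dict.ofList [(("safe" : String), (0 : Int)), ("unsafe", 0)] =
      PySem.Dict.mk [("safe", 0), ("unsafe", 0)] := by decide
  rw [h0, count_safety_loop, csGo_eq]
  simp
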